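-- pv_equiv track=rewrite | github.com/thepian/pypy | pypy/rlib/rstring.py | string_repeat
-- ===== SOURCE A (Python) =====
-- def string_repeat(s, mul):
--     """Repeat a string or unicode.  Note that this assumes that 'mul' > 0."""
--     result = None
--     factor = 1
--     assert mul > 0
--     limit = mul >> 1
--     while True:
--         if mul & factor:
--             if result is None:
--                 result = s
--             else:
--                 result = s + result
--             if factor > limit:
--                 break
--         s += s
--         factor *= 2
--     return result
-- ===== SOURCE B (Python) =====
-- def string_repeat(s, mul):
--     """Repeat a string or unicode.  Note that this assumes that 'mul' > 0."""
--     assert mul > 0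
--     return s * mul
-- ===== Notes on version B (the rewrite author's own statement) =====
-- stated objective: idiomatic
-- what changed: Replaced the hand-rolled binary exponentiation-by-doubling loop with the builtin string repetition s * mul (keeping the assert mul > 0).
import Mathlib
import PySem

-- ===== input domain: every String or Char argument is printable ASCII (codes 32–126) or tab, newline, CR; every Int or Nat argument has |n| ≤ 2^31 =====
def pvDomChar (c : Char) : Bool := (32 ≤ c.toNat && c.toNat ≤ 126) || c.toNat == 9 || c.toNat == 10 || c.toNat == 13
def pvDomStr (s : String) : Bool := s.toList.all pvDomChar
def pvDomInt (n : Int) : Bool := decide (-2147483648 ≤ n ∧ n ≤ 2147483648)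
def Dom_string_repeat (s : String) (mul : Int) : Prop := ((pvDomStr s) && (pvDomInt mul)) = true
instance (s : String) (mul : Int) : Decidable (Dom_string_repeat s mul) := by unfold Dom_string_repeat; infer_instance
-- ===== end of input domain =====

-- B replaces A's binary doubling loop with the builtin repetition s * mul (idiomatic); both raise AssertionError for mul ≤ 0 (excluded by Pre_).

-- ===== PORT A =====
-- the `while True` loop of A: state is (s, factor, result); fuel bounds the
-- number of doubling rounds (mul.toNat rounds always suffice, see the lemmas)
def stringRepeatLoop (s : String) (factor : Nat) (result : Option String) (m : Nat) :
    Nat → Option String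
  | 0 => result
  | fuel + 1 =>
    if m &&& factor ≠ 0 then
      let result' : String := match result with
        | none => s
        | some r => s ++ r
      if factor > m / 2 then some result'
      else stringRepeatLoop (s ++ s) (factor * 2) (some result') m fuel
    else stringRepeatLoop (s ++ s) (factor * 2) result m fuel

-- `assert mul > 0` raises for mul ≤ 0: those inputs are outside Pre_; the loop
-- state is carried in Nat, exact for the admitted mul > 0.
def string_repeat (s : String) (mul : Int) : String :=
  if mul > 0 then (stringRepeatLoop s 1 none mul.toNat mul.toNat).getD "" else ""

-- ===== PORT B =====
-- Python `s * mul`: n copies of s concatenated (empty for mul ≤ 0, where the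
-- assert raises anyway — outside Pre_)
def strMulNat (s : String) : Nat → String
  | 0 => ""
  | n + 1 => s ++ strMulNat s n

def string_repeat_alt (s : String) (mul : Int) : String :=
  if mul > 0 then strMulNat s mul.toNat else ""

-- ===== PRECONDITION & SPEC =====
-- Pre_ excludes mul ≤ 0, where both A and B raise AssertionError.
def Pre_string_repeat (s : String) (mul : Int) : Prop := 0 < mul
instance (s : String) (mul : Int) : Decidable (Pre_string_repeat s mul) := by
  unfold Pre_string_repeat; infer_instance
def pvWitness_string_repeat : String × Int := ("ab", 3)

def Spec_string_repeat (s : String) (mul : Int) (out : String) : Prop := out = string_repeat_alt s mul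
instance (s : String) (mul : Int) (out : String) : Decidable (Spec_string_repeat s mul out) := by unfold Spec_string_repeat; infer_instance

-- ===== CLAIM (what is proved, stated in full; the proofs are below) =====
def Claim_equal_string_repeat : Prop := ∀ (s : String) (mul : Int), Dom_string_repeat s mul → Pre_string_repeat s mul → Spec_string_repeat s mul (string_repeat s mul)

-- ===== LEMMAS AND PROOFS =====

theorem strMulNat_add (s : String) (a b : Nat) :
    strMulNat s (a + b) = strMulNat s a ++ strMulNat s b := by
  induction a with
  | zero => simp [strMulNat]
  | succ a ih =>
    have : a + 1 + b = (a + b) + 1 := by omega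
    rw [this, strMulNat, strMulNat, ih, String.append_assoc]

theorem mod_pow_succ_testBit (m k : ℕ) :
    m % 2^(k+1) = (if m.testBit k then 2^k else 0) + m % 2^k := by
  rw [Nat.mod_pow_succ]
  have h2 : m.testBit k = decide (m / 2^k % 2 = 1) := Nat.testBit_eq_decide_div_mod_eq
  have h3 : m / 2^k % 2 < 2 := Nat.mod_lt _ (by norm_num)
  by_cases hb : m.testBit k
  · rw [hb] at h2
    have h4 : m / 2^k % 2 = 1 := of_decide_eq_true h2.symm
    simp only [hb, if_true, h4]
    ring
  · rw [Bool.not_eq_true] at hb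
    rw [hb] at h2
    have h4 : ¬ (m / 2^k % 2 = 1) := of_decide_eq_false h2.symm
    have h5 : m / 2^k % 2 = 0 := by omega
    simp [h5, hb]

theorem and_two_pow_ne (m k : ℕ) : (m &&& 2^k ≠ 0) ↔ m.testBit k := by
  rw [Nat.and_two_pow]
  by_cases hb : m.testBit k <;> simp [hb]

-- optRep n: the Python `result` after processing the k low bits, where n = m % 2^k
def optRep (t : String) (n : Nat) : Option String :=
  if n = 0 then none else some (strMulNat t n)

-- loop invariant: with factor = 2^k, current string = s repeated 2^k and
-- result = optRep of the low k bits, the loop returns s repeated m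
theorem stringRepeatLoop_invariant (s : String) (m : Nat) :
    ∀ (fuel k : Nat), 2^k ≤ m → m < 2^(k + fuel) →
      stringRepeatLoop (strMulNat s (2^k)) (2^k) (optRep s (m % 2^k)) m fuel =
        some (strMulNat s m) := by
  intro fuel
  induction fuel with
  | zero => intro k h1 h2; simp only [Nat.add_zero] at h2; omega
  | succ fuel ih =>
    intro k h1 h2
    have hmod : m % 2^(k+1) = (if m.testBit k then 2^k else 0) + m % 2^k :=
      mod_pow_succ_testBit m k
    have hlt : m % 2^k < 2^k := Nat.mod_lt _ (Nat.two_pow_pos k)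
    have hdouble : strMulNat s (2^k) ++ strMulNat s (2^k) = strMulNat s (2^(k+1)) := by
      rw [pow_succ, show 2^k * 2 = 2^k + 2^k by ring, strMulNat_add]
    have hfuel : k + 1 + fuel = k + (fuel + 1) := by omega
    have hpow : 2^k * 2 = 2^(k+1) := by rw [pow_succ]
    by_cases hb : m.testBit k
    · -- bit k of m is set: result is extended with the current string
      have hne : m &&& 2^k ≠ 0 := (and_two_pow_ne m k).mpr hb
      have hsum : 2^k + m % 2^k = m % 2^(k+1) := by rw [hmod]; simp [hb]
      have hres : (match optRep s (m % 2^k) with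
          | none => strMulNat s (2^k)
          | some r => strMulNat s (2^k) ++ r) = strMulNat s (m % 2^(k+1)) := by
        by_cases h0 : m % 2^k = 0
        · rw [← hsum, h0]; simp [optRep]
        · simp only [optRep, h0, ite_false]
          rw [← hsum, strMulNat_add]
      by_cases hbrk : 2^k > m / 2
      · -- break: factor > limit, so 2^k is the top set bit and m % 2^(k+1) = m
        have hm2 : m < 2^(k+1) := by rw [pow_succ]; omega
        have hmm : m % 2^(k+1) = m := Nat.mod_eq_of_lt hm2
        simp only [stringRepeatLoop, hne, ne_eq, not_false_eq_true, if_true, hbrk,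
          Option.some.injEq]
        rw [hres, hmm]
      · have hge : 2^(k+1) ≤ m := by rw [pow_succ]; omega
        have hres' : optRep s (m % 2^(k+1)) = some (strMulNat s (m % 2^(k+1))) := by
          have hz : m % 2^(k+1) ≠ 0 := by rw [hmod]; simp only [hb, if_true]; positivity
          simp [optRep, hz]
        simp only [stringRepeatLoop, hne, ne_eq, not_false_eq_true, if_true, hbrk,
          ite_false]
        rw [hres, hdouble, hpow, ← hres']
        exact ih (k+1) hge (hfuel ▸ h2)
    · -- bit k of m is clear: result unchanged; since 2^k ≤ m, 2^(k+1) ≤ m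
      have hne : ¬ (m &&& 2^k ≠ 0) := by rw [and_two_pow_ne]; exact hb
      have hmodeq : m % 2^(k+1) = m % 2^k := by rw [hmod]; simp [hb]
      have hge : 2^(k+1) ≤ m := by
        by_contra hc
        rw [not_le] at hc
        have := Nat.mod_eq_of_lt hc
        omega
      simp only [stringRepeatLoop, hne, ite_false]
      rw [hdouble, hpow, ← hmodeq]
      exact ih (k+1) hge (hfuel ▸ h2)

-- ===== VERDICT (by name: the statement is the Claim_ definition above) =====
theorem string_repeat_spec : Claim_equal_string_repeat := by
  intro s mul _ hpre
  unfold Spec_string_repeat string_repeat string_repeat_alt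
  have hpos : mul > 0 := hpre
  have hm : 0 < mul.toNat := by omega
  simp only [hpos, if_true]
  have h1 : strMulNat s (2^0) = s := by simp [strMulNat]
  have h2 : optRep s (mul.toNat % 2^0) = none := by simp [optRep, Nat.mod_one]
  have key := stringRepeatLoop_invariant s mul.toNat mul.toNat 0
    (by simp only [pow_zero]; omega)
    (by simp only [Nat.zero_add]; exact Nat.lt_two_pow_self)
  rw [h1, h2] at key
  simp only [pow_zero] at key
  rw [key]
  rfl
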